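-- pv_equiv track=rewrite | github.com/paragshah7/Python-CodingChallenges-LeetCode | InterviewCake/Meandearing.py | meanderingArray
-- ===== SOURCE A (Python) =====
-- def meanderingArray(unsorted):
--
--     unsorted.sort(reverse=True)
--     meanderedArray = []
--     i = 0
--     arrayLength = len(unsorted)
--
--     while i < arrayLength // 2:
--         meanderedArray.append(unsorted[i])
--         meanderedArray.append(unsorted[-(i+1)])
--         i += 1
--
--     if arrayLength % 2 != 0:
--         meanderedArray.append(unsorted[i])
--
--     return meanderedArray
-- ===== SOURCE B (Python) =====
-- def meanderingArray(unsorted):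
--     unsorted.sort(reverse=True)
--     n = len(unsorted)
--     k = (n + 1) // 2
--     result = [None] * n
--     result[0::2] = unsorted[:k]
--     result[1::2] = unsorted[k:][::-1]
--     return result
-- ===== Notes on version B (the rewrite author's own statement) =====
-- stated objective: idiomatic
-- what changed: Replaces A's two-pointer while-loop (appending s[i] and s[-(i+1)] each iteration plus an odd-length middle case) by splitting the descending-sorted list at (n+1)//2 and filling the even and odd strides of the result with the peak half and the reversed valley half via two slice assignments.
import Mathlib
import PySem

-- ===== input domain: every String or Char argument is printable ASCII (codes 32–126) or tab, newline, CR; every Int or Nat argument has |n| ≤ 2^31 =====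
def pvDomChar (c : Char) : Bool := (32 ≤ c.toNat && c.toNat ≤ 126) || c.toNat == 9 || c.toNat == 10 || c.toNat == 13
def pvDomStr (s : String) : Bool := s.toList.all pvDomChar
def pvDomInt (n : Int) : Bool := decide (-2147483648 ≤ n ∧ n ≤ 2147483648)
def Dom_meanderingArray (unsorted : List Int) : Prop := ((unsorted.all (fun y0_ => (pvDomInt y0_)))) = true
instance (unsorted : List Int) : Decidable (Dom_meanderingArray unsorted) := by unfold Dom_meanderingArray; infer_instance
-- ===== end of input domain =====

-- B replaces A's two-pointer while-loop by a split of the descending-sorted list into the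
-- peak half and the reversed valley half, interleaved (Python: two strided slice assignments);
-- same cost, plainer decomposition. Both A and B sort the argument in place (same side effect);
-- the equivalence proved here is about the return value.


-- ===== PORT A =====
-- while-loop over i = 0 .. arrayLength//2 - 1 ported as a fold over the same index range
def meanderingArray (unsorted : List Int) : List Int :=
  let s := PySem.List.sorted unsorted (fun x => x) true
  let arrayLength : Int := s.length
  let loop := (PySem.List.pyRange 0 (PySem.Int.floordiv arrayLength 2) 1).foldl
    (fun acc i => acc ++ [PySem.List.pyGetD s i 0] ++ [PySem.List.pyGetD s (-(i+1)) 0]) []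
  if PySem.Int.mod arrayLength 2 ≠ 0 then
    loop ++ [PySem.List.pyGetD s (PySem.Int.floordiv arrayLength 2) 0]
  else loop

-- ===== PORT B =====
-- result[0::2] = p; result[1::2] = v fills the n slots alternately from p and v
-- (|p| = ⌈n/2⌉, |v| = ⌊n/2⌋), i.e. the alternation of the two sequences:
def pvInterleave : List Int → List Int → List Int
  | [], ys => ys
  | x :: xs, ys => x :: pvInterleave ys xs
termination_by xs ys => xs.length + ys.length
decreasing_by simp; omega

def meanderingArray_alt (unsorted : List Int) : List Int :=
  let s := PySem.List.sorted unsorted (fun x => x) true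
  let k : Int := PySem.Int.floordiv ((s.length : Int) + 1) 2
  -- unsorted[:k], unsorted[k:][::-1] ([::-1] is reverse, PySem.List.slice?_none_none_neg_one)
  pvInterleave (PySem.List.slice s none (some k)) (PySem.List.slice s (some k) none).reverse

-- ===== PRECONDITION & SPEC =====
def Spec_meanderingArray (unsorted : List Int) (out : List Int) : Prop := out = meanderingArray_alt unsorted
instance (unsorted : List Int) (out : List Int) : Decidable (Spec_meanderingArray unsorted out) := by unfold Spec_meanderingArray; infer_instance

-- ===== CLAIM (what is proved, stated in full; the proofs are below) =====
def Claim_equal_meanderingArray : Prop := ∀ (unsorted : List Int), Dom_meanderingArray unsorted → Spec_meanderingArray unsorted (meanderingArray unsorted)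

-- ===== LEMMAS AND PROOFS =====

-- A's loop output, in Nat-indexed closed form
def pvAform (s : List Int) : List Int :=
  (List.range (s.length / 2)).flatMap (fun i => [s.getD i 0, s.getD (s.length - 1 - i) 0])
    ++ (if s.length % 2 = 1 then [s.getD (s.length / 2) 0] else [])

-- B's output in take/drop form
def pvBform (s : List Int) : List Int :=
  pvInterleave (s.take ((s.length + 1) / 2)) ((s.drop ((s.length + 1) / 2)).reverse)

theorem pvFlatMapCongr {α β : Type} (l : List α) (f g : α → List β)
    (h : ∀ x ∈ l, f x = g x) : l.flatMap f = l.flatMap g := by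
  simp only [List.flatMap]
  exact congrArg List.flatten (List.map_congr_left h)

theorem pvA_char (xs : List Int) :
    meanderingArray xs = pvAform (PySem.List.sorted xs (fun x => x) true) := by
  unfold meanderingArray
  set s := PySem.List.sorted xs (fun x => x) true with hs
  have hfd : PySem.Int.floordiv ((s.length : Int)) 2 = ((s.length / 2 : Nat) : Int) := by
    rw [PySem.Int.floordiv_eq_ediv_of_pos (by omega)]; omega
  have hmod : (PySem.Int.mod ((s.length : Int)) 2 ≠ 0) ↔ s.length % 2 = 1 := by
    rw [PySem.Int.mod_eq_emod_of_pos (by omega)]; omega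
  simp only [hfd]
  simp only [List.append_assoc]
  rw [PySem.List.foldl_append_eq_flatMap]
  rw [PySem.List.pyRange_one]
  simp only [Int.sub_zero, Int.toNat_natCast]
  have hcore : ((List.range (s.length / 2)).map
        (fun k : Nat => (0 : Int) + (k : Int))).flatMap
        (fun i => [PySem.List.pyGetD s i 0] ++ [PySem.List.pyGetD s (-(i+1)) 0])
      = (List.range (s.length / 2)).flatMap
        (fun i => [s.getD i 0, s.getD (s.length - 1 - i) 0]) := by
    rw [List.flatMap_map]
    apply pvFlatMapCongr
    intro k hk
    rw [List.mem_range] at hk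
    have hk1 : k + 1 ≤ s.length := by omega
    have h1 : PySem.List.pyGetD s ((0:Int) + (k:Int)) 0 = s.getD k 0 := by
      simp
    have hneg : -((0:Int) + (k:Int) + 1) = -(((k+1 : Nat) : Int)) := by push_cast; ring
    have h2 : PySem.List.pyGetD s (-((0:Int) + (k:Int) + 1)) 0 = s.getD (s.length - 1 - k) 0 := by
      rw [hneg, PySem.List.pyGetD_neg_natCast s (k+1) 0 (by omega) hk1]
      rw [List.getD_eq_getElem _ _ (by omega)]
      congr 1
      omega
    rw [h1, h2]
    rfl
  rw [hcore]
  by_cases h : s.length % 2 = 1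
  · rw [if_pos (hmod.mpr h), pvAform, if_pos h]
    have hmid : PySem.List.pyGetD s ((s.length / 2 : Nat) : Int) 0 = s.getD (s.length / 2) 0 := by
      simp only [PySem.List.pyGetD_natCast]
    rw [hmid]
    simp
  · rw [if_neg (fun hc => h (hmod.mp hc)), pvAform, if_neg h]
    simp

theorem pvB_char (xs : List Int) :
    meanderingArray_alt xs = pvBform (PySem.List.sorted xs (fun x => x) true) := by
  unfold meanderingArray_alt
  set s := PySem.List.sorted xs (fun x => x) true with hs
  have h : PySem.Int.floordiv ((s.length : Int) + 1) 2 = (((s.length + 1) / 2 : Nat) : Int) := by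
    rw [PySem.Int.floordiv_eq_ediv_of_pos (by omega)]; omega
  simp only [h, PySem.List.slice_to_natCast, PySem.List.slice_from_natCast]
  rfl

theorem pvAstep (a b : Int) (t : List Int) :
    pvAform (a :: (t ++ [b])) = a :: b :: pvAform t := by
  have hl : (a :: (t ++ [b])).length = t.length + 2 := by simp
  have h2 : (t.length + 2) / 2 = t.length / 2 + 1 := by omega
  rw [pvAform, hl, h2, List.range_succ_eq_map]
  rw [List.flatMap_cons, List.flatMap_map]
  have hhead : [(a :: (t ++ [b])).getD 0 0, (a :: (t ++ [b])).getD (t.length + 2 - 1 - 0) 0]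
      = [a, b] := by
    have : t.length + 2 - 1 - 0 = t.length + 1 := by omega
    rw [this]
    simp
  have hcore : (List.range (t.length / 2)).flatMap
        (fun i : Nat => [(a :: (t ++ [b])).getD i.succ 0, (a :: (t ++ [b])).getD (t.length + 2 - 1 - i.succ) 0])
      = (List.range (t.length / 2)).flatMap
        (fun i => [t.getD i 0, t.getD (t.length - 1 - i) 0]) := by
    apply pvFlatMapCongr
    intro i hi
    rw [List.mem_range] at hi
    have him : i < t.length := by omega
    have e1 : (a :: (t ++ [b])).getD (Nat.succ i) 0 = t.getD i 0 := by
      rw [List.getD_cons_succ]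
      rw [List.getD_eq_getElem _ _ (by simp; omega), List.getD_eq_getElem _ _ him]
      rw [List.getElem_append_left him]
    have e2 : (a :: (t ++ [b])).getD (t.length + 2 - 1 - Nat.succ i) 0 = t.getD (t.length - 1 - i) 0 := by
      have : t.length + 2 - 1 - Nat.succ i = (t.length - 1 - i) + 1 := by omega
      rw [this, List.getD_cons_succ]
      rw [List.getD_eq_getElem _ _ (by simp; omega), List.getD_eq_getElem _ _ (by omega)]
      rw [List.getElem_append_left (by omega)]
    rw [e1, e2]
  rw [hhead, hcore]
  have hmodeq : (t.length + 2) % 2 = t.length % 2 := by omega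
  by_cases h : t.length % 2 = 1
  · rw [if_pos (by omega), pvAform, if_pos h]
    have hmid : (a :: (t ++ [b])).getD (t.length / 2 + 1) 0 = t.getD (t.length / 2) 0 := by
      rw [List.getD_cons_succ]
      rw [List.getD_eq_getElem _ _ (by simp; omega), List.getD_eq_getElem _ _ (by omega)]
      rw [List.getElem_append_left (by omega)]
    rw [hmid]
    simp
  · rw [if_neg (by omega), pvAform, if_neg h]
    simp

theorem pvBstep (a b : Int) (t : List Int) :
    pvBform (a :: (t ++ [b])) = a :: b :: pvBform t := by
  have hm : ((a :: (t ++ [b])).length + 1) / 2 = (t.length + 1) / 2 + 1 := by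
    simp; omega
  have hk : (t.length + 1) / 2 ≤ t.length := by omega
  rw [pvBform, hm, List.take_succ_cons, List.drop_succ_cons,
      List.take_append_of_le_length hk, List.drop_append_of_le_length hk]
  simp [pvInterleave, pvBform]

theorem pvMain (s : List Int) : pvAform s = pvBform s := by
  induction s using List.bidirectionalRec with
  | nil => simp [pvAform, pvBform, pvInterleave]
  | singleton a => simp [pvAform, pvBform, pvInterleave]
  | cons_append a t b ih => rw [pvAstep, pvBstep, ih]

-- ===== VERDICT (by name: the statement is the Claim_ definition above) =====
theorem meanderingArray_spec : Claim_equal_meanderingArray := by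
  intro xs _
  unfold Spec_meanderingArray
  rw [pvA_char, pvB_char, pvMain]
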